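-- pv_equiv track=rewrite | github.com/DEDBW/python_KUBGTU | task_1.py | funk2
-- ===== SOURCE A (Python) =====
-- def funk2(n):
--     digits = []
--     for d in str(n):
--         if int(d) % 2 == 1:
--             digits.append(int(d))
--
--     if digits:
--         return min(digits)
--     else:
--         return None
-- ===== SOURCE B (Python) =====
-- def funk2(n):
--     present = set()
--     for d in str(n):
--         present.add(int(d))
--     for c in (1, 3, 5, 7, 9):
--         if c in present:
--             return c
--     return None
-- ===== Notes on version B (the rewrite author's own statement) =====
-- stated objective: alternative
-- what changed: Instead of collecting all odd digits into a list and taking min(), B records the set of digits present in one pass and returns the first of the candidates (1,3,5,7,9) found in that set, so no odd-digit list and no min scan exist.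
import Mathlib
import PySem

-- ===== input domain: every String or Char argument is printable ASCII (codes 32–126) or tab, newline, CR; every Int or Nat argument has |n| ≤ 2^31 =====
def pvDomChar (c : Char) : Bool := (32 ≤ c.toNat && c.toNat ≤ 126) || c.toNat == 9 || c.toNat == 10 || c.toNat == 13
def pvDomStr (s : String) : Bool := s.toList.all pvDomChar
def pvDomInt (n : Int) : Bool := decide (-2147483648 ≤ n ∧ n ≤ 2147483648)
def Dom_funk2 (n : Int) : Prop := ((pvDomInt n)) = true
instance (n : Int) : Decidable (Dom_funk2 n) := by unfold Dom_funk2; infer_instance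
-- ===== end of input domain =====

-- B differs from A by checking the odd candidates 1,3,5,7,9 in order against the set of
-- digits present, instead of collecting the odd digits into a list and taking min().

-- ===== PORT A =====
-- int(d) for a single character d; 'none' is Python's ValueError (excluded by Pre_funk2,
-- which restricts to 0 ≤ n so str(n) contains only digit characters).
def pvIntOf (c : Char) : Int := (PySem.Int.ofStr? (String.ofList [c])).getD 0

def funk2 (n : Int) : Option Int :=
  let digits : List Int :=
    (PySem.Int.toStr n).toList.foldl
      (fun acc c => if PySem.Int.mod (pvIntOf c) 2 == 1 then acc ++ [pvIntOf c] else acc) []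
  if digits.isEmpty then none else PySem.List.min? digits (fun x => x)

-- ===== PORT B =====
-- 'for c in (1,3,5,7,9): if c in present: return c' / 'return None'
def pvPickFirst (present : PySem.Set Int) : List Int → Option Int
  | [] => none
  | c :: rest => if PySem.Set.contains present c then some c else pvPickFirst present rest

def funk2_alt (n : Int) : Option Int :=
  let present : PySem.Set Int :=
    (PySem.Int.toStr n).toList.foldl
      (fun s c => PySem.Set.add s (pvIntOf c)) PySem.Set.empty
  pvPickFirst present [1, 3, 5, 7, 9]

-- ===== PRECONDITION & SPEC =====
-- Pre_ excludes negative n: str(n) then starts with '-' and int('-') raises ValueError in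
-- both A and B.
def Pre_funk2 (n : Int) : Prop := 0 ≤ n
instance (n : Int) : Decidable (Pre_funk2 n) := by unfold Pre_funk2; infer_instance
def pvWitness_funk2 : Int := 35

def Spec_funk2 (n : Int) (out : Option Int) : Prop := out = funk2_alt n
instance (n : Int) (out : Option Int) : Decidable (Spec_funk2 n out) := by unfold Spec_funk2; infer_instance

-- ===== CLAIM (what is proved, stated in full; the proofs are below) =====
def Claim_equal_funk2 : Prop := ∀ (n : Int), Dom_funk2 n → Pre_funk2 n → Spec_funk2 n (funk2 n)

-- ===== LEMMAS AND PROOFS =====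

def pvDigitChars : List Char := ['0','1','2','3','4','5','6','7','8','9']

theorem pvToDigitsCore_mem (f : Nat) : ∀ (m : Nat) (ds : List Char),
    (∀ c ∈ ds, c ∈ pvDigitChars) → ∀ c ∈ Nat.toDigitsCore 10 f m ds, c ∈ pvDigitChars := by
  induction f with
  | zero => intro m ds hds c hc; exact hds c hc
  | succ f ih =>
    intro m ds hds c hc
    have hall : ∀ k : Nat, k < 10 → k.digitChar ∈ pvDigitChars := by
      intro k hk; interval_cases k <;> decide
    have hd : (m % 10).digitChar ∈ pvDigitChars := hall _ (Nat.mod_lt _ (by omega))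
    simp only [Nat.toDigitsCore] at hc
    split at hc
    · rcases List.mem_cons.mp hc with h | h
      · exact h ▸ hd
      · exact hds c h
    · exact ih (m / 10) (_ :: ds)
        (by intro c' hc'; rcases List.mem_cons.mp hc' with h | h; exacts [h ▸ hd, hds c' h]) c hc

theorem pvToChars_digits (n : Int) (hn : 0 ≤ n) :
    ∀ c ∈ (PySem.Int.toStr n).toList, c ∈ pvDigitChars := by
  have : (PySem.Int.toStr n).toList = Nat.toDigits 10 n.toNat := by
    simp [PySem.Int.toStr, PySem.Int.toChars, not_lt.mpr hn]
  rw [this, Nat.toDigits]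
  exact pvToDigitsCore_mem _ _ _ (by intro c hc; cases hc)

theorem pvIntOf_range (c : Char) (hc : c ∈ pvDigitChars) :
    0 ≤ pvIntOf c ∧ pvIntOf c ≤ 9 := by
  fin_cases hc <;> decide

-- min with identity key is determined by 'a member below all members'
theorem pvMin_eq (xs : List Int) (m : Int) (hm : m ∈ xs) (hle : ∀ y ∈ xs, m ≤ y) :
    PySem.List.min? xs (fun y => y) = some m := by
  cases h : PySem.List.min? xs (fun y => y) with
  | none =>
    rw [PySem.List.min?_eq_none_iff] at h
    subst h; cases hm
  | some m' =>
    have h1 : m' ∈ xs := PySem.List.min?_mem h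
    have h2 : ∀ y ∈ xs, m' ≤ y := PySem.List.min?_isMin h
    have : m' = m := le_antisymm (h2 m hm) (hle m' h1)
    rw [this]

theorem pvOddDigit (y : Int) (h0 : 0 ≤ y) (h9 : y ≤ 9) (ho : PySem.Int.mod y 2 = 1) :
    y = 1 ∨ y = 3 ∨ y = 5 ∨ y = 7 ∨ y = 9 := by
  interval_cases y <;> simp_all

-- core: min of the odd elements = first present candidate, for digit-valued lists
theorem pvCore (ds : List Int) (hd : ∀ d ∈ ds, 0 ≤ d ∧ d ≤ 9) :
    PySem.List.min? (ds.filter (fun d => PySem.Int.mod d 2 == 1)) (fun y => y) =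
      (if 1 ∈ ds then some 1 else if 3 ∈ ds then some 3 else if 5 ∈ ds then some 5
        else if 7 ∈ ds then some 7 else if 9 ∈ ds then some 9 else none) := by
  have hmemf : ∀ y, y ∈ ds.filter (fun d => PySem.Int.mod d 2 == 1) ↔
      (y ∈ ds ∧ PySem.Int.mod y 2 = 1) := by
    intro y; simp [List.mem_filter]
  have hcand : ∀ y ∈ ds.filter (fun d => PySem.Int.mod d 2 == 1),
      y = 1 ∨ y = 3 ∨ y = 5 ∨ y = 7 ∨ y = 9 := by
    intro y hy
    rw [hmemf] at hy
    exact pvOddDigit y (hd y hy.1).1 (hd y hy.1).2 hy.2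
  have hin : ∀ y : Int, y ∈ ds → PySem.Int.mod y 2 = 1 →
      y ∈ ds.filter (fun d => PySem.Int.mod d 2 == 1) := by
    intro y hy ho; rw [hmemf]; exact ⟨hy, ho⟩
  split_ifs with h1 h3 h5 h7 h9
  · refine pvMin_eq _ _ (hin 1 h1 (by decide)) ?_
    intro y hy; rcases hcand y hy with h|h|h|h|h <;> omega
  · refine pvMin_eq _ _ (hin 3 h3 (by decide)) ?_
    intro y hy
    have hy1 : y ≠ 1 := fun he => h1 (he ▸ (hmemf y).mp hy |>.1)
    rcases hcand y hy with h|h|h|h|h <;> omega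
  · refine pvMin_eq _ _ (hin 5 h5 (by decide)) ?_
    intro y hy
    have hy1 : y ≠ 1 := fun he => h1 (he ▸ (hmemf y).mp hy |>.1)
    have hy3 : y ≠ 3 := fun he => h3 (he ▸ (hmemf y).mp hy |>.1)
    rcases hcand y hy with h|h|h|h|h <;> omega
  · refine pvMin_eq _ _ (hin 7 h7 (by decide)) ?_
    intro y hy
    have hy1 : y ≠ 1 := fun he => h1 (he ▸ (hmemf y).mp hy |>.1)
    have hy3 : y ≠ 3 := fun he => h3 (he ▸ (hmemf y).mp hy |>.1)
    have hy5 : y ≠ 5 := fun he => h5 (he ▸ (hmemf y).mp hy |>.1)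
    rcases hcand y hy with h|h|h|h|h <;> omega
  · refine pvMin_eq _ _ (hin 9 h9 (by decide)) ?_
    intro y hy
    have hy1 : y ≠ 1 := fun he => h1 (he ▸ (hmemf y).mp hy |>.1)
    have hy3 : y ≠ 3 := fun he => h3 (he ▸ (hmemf y).mp hy |>.1)
    have hy5 : y ≠ 5 := fun he => h5 (he ▸ (hmemf y).mp hy |>.1)
    have hy7 : y ≠ 7 := fun he => h7 (he ▸ (hmemf y).mp hy |>.1)
    rcases hcand y hy with h|h|h|h|h <;> omega
  · rw [PySem.List.min?_eq_none_iff]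
    rw [List.eq_nil_iff_forall_not_mem]
    intro y hy
    have := (hmemf y).mp hy
    rcases hcand y hy with h|h|h|h|h <;> subst h
    exacts [h1 this.1, h3 this.1, h5 this.1, h7 this.1, h9 this.1]

theorem pvPick_eq (ds : List Int) :
    pvPickFirst (PySem.Set.ofList ds) [1, 3, 5, 7, 9] =
      (if 1 ∈ ds then some 1 else if 3 ∈ ds then some 3 else if 5 ∈ ds then some 5
        else if 7 ∈ ds then some 7 else if 9 ∈ ds then some 9 else none) := by
  have hc : ∀ x : Int, PySem.Set.contains (PySem.Set.ofList ds) x = decide (x ∈ ds) := by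
    intro x
    by_cases hx : x ∈ ds
    · simp [hx]
    · simp only [hx, decide_false]
      by_contra h
      exact hx ((PySem.Set.mem_ofList ds x).mp
        ((PySem.Set.contains_iff _ _).mp (by revert h; cases PySem.Set.contains (PySem.Set.ofList ds) x <;> simp)))
  simp [pvPickFirst]

-- ===== VERDICT (by name: the statement is the Claim_ definition above) =====
theorem funk2_spec : Claim_equal_funk2 := by
  intro n _ hpre
  unfold Spec_funk2 funk2 funk2_alt
  have hdigchars := pvToChars_digits n hpre
  set l := (PySem.Int.toStr n).toList with hl
  have hA : l.foldl
      (fun acc c => if PySem.Int.mod (pvIntOf c) 2 == 1 then acc ++ [pvIntOf c] else acc) [] =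
      (l.map pvIntOf).filter (fun d => PySem.Int.mod d 2 == 1) := by
    rw [PySem.List.foldl_append_if (fun c => PySem.Int.mod (pvIntOf c) 2 == 1) pvIntOf l []]
    rw [List.filter_map]
    rfl
  have hB : l.foldl (fun s c => PySem.Set.add s (pvIntOf c)) PySem.Set.empty =
      PySem.Set.ofList (l.map pvIntOf) := by
    rw [PySem.Set.ofList_eq_foldl, List.foldl_map]
    rfl
  simp only [hA, hB]
  have hd : ∀ d ∈ l.map pvIntOf, 0 ≤ d ∧ d ≤ 9 := by
    intro d hd
    rcases List.mem_map.mp hd with ⟨c, hc, rfl⟩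
    exact pvIntOf_range c (hdigchars c hc)
  rw [pvPick_eq]
  rw [← pvCore (l.map pvIntOf) hd]
  rcases h : (l.map pvIntOf).filter (fun d => PySem.Int.mod d 2 == 1) with _ | ⟨x, xs⟩
  · simp only [List.isEmpty_nil, if_true]
    exact ((PySem.List.min?_eq_none_iff [] _).mpr rfl).symm
  · rw [if_neg (by simp)]
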